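-- pv_equiv track=rewrite | github.com/orlandxrf/web-app-robson-criteria-classification | app.py | align_bert_entities
-- ===== SOURCE A (Python) =====
-- def align_bert_entities(aligned_labels: tuple[str, str]) -> dict[str, list[str]]:
--     merged_entities = {}
--     current_tokens = []
--     current_label = None
--
--     for token, label in aligned_labels:
--         if token.startswith("##"):  # it is a subtoken
--             current_tokens[-1] += token[2:]  # add to last token without "##"
--         else:
--             if label.startswith("B-") or label == "O":
--                 # if there is a previous entity, save it before starting a new one
--                 if current_tokens and current_label:
--                     # merged_entities.append((" ".join(current_tokens), current_label))
--                     if current_label not in merged_entities: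
--                         merged_entities[current_label] = [" ".join(current_tokens)]
--                     else:
--                         merged_entities[current_label].append(" ".join(current_tokens))
--                 # start new entity
--                 current_tokens = [token]
--                 current_label = (
--                     label.replace("B-", "") if label.startswith("B-") else None
--                 )
--             elif label.startswith("I-") and current_label:
--                 current_tokens.append(token)
--
--     # add the last entity if it exists
--     if current_tokens and current_label:
--         # merged_entities.append((" ".join(current_tokens), current_label))
--         if current_label not in merged_entities:
--             merged_entities[current_label] = [" ".join(current_tokens)]
--         else:
--             merged_entities[current_label].append(" ".join(current_tokens))
--
--     return merged_entities
-- ===== SOURCE B (Python) =====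
-- def align_bert_entities(aligned_labels):
--     # Pass 1: partition the pairs into chunks, each opened by a boundary pair
--     # (a non-subtoken with a "B-" or "O" label); pairs before the first
--     # boundary are dropped.
--     chunks = []
--     for pair in aligned_labels:
--         token, label = pair
--         if not token.startswith("##") and (label.startswith("B-") or label == "O"):
--             chunks.append([pair])
--         elif chunks:
--             chunks[-1].append(pair)
--     # Pass 2: map each B-labelled chunk to its entity text and group by label.
--     merged = {}
--     for chunk in chunks:
--         head_token, head_label = chunk[0]
--         if not head_label.startswith("B-"):
--             continue
--         entity = head_label.replace("B-", "")
--         if not entity: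
--             continue
--         words = [head_token]
--         for token, label in chunk[1:]:
--             if token.startswith("##"):
--                 words[-1] += token[2:]
--             elif label.startswith("I-"):
--                 words.append(token)
--         merged.setdefault(entity, []).append(" ".join(words))
--     return merged
-- ===== Notes on version B (the rewrite author's own statement) =====
-- stated objective: alternative
-- what changed: B replaces A's single-pass state machine (token buffer + current label + duplicated dict-flush block) by a staged pipeline: partition the pairs into chunks at boundary pairs, then map each B-labelled chunk independently to its entity text, then group the texts by label.
import Mathlib
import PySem

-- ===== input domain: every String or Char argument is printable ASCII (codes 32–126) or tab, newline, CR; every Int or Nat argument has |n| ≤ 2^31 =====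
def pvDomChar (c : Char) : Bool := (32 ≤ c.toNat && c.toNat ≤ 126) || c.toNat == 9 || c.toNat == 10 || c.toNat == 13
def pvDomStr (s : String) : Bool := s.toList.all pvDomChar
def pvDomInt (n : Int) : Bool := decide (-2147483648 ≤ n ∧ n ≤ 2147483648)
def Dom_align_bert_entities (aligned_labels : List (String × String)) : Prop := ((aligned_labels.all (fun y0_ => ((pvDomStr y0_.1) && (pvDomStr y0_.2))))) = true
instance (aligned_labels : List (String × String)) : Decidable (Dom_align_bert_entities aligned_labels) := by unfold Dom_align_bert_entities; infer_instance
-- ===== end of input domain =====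

-- B restructures A's single-pass state machine as partition-into-chunks → map-chunk-to-entity → group-by-label; alternative decomposition, same cost.
-- Equivalence is about the returned dict; neither version observably mutates its argument.

-- Python truthiness of `current_label` (None or a string: truthy iff a nonempty string)
def pvTruthy : Option String → Bool
  | none => false
  | some s => !(s == "")

-- ===== PORT A =====
-- A's flush block (it appears verbatim twice in A: inside the loop and after it)
def pvFlushA (merged : PySem.Dict String (List String)) (ct : List String) (cl : Option String) :
    PySem.Dict String (List String) :=
  if !ct.isEmpty && pvTruthy cl then
    let l := cl.getD ""
    let s := PySem.Str.join " " ct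
    if merged.contains l then merged.modify l [] (fun v => v ++ [s]) else merged.insert l [s]
  else merged

-- one iteration of A's for-loop over state (merged_entities, current_tokens, current_label)
def pvStepA (st : PySem.Dict String (List String) × List String × Option String) (p : String × String) :
    PySem.Dict String (List String) × List String × Option String :=
  match st with
  | (merged, ct, cl) =>
    if PySem.Str.startswith p.1 "##" then
      -- current_tokens[-1] += token[2:]  (IndexError when ct = [] — outside Pre_; state kept unchanged there)
      match ct.getLast? with
      | some t => (merged, ct.dropLast ++ [t ++ PySem.Str.slice p.1 (some 2) none], cl)
      | none => (merged, ct, cl)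
    else if PySem.Str.startswith p.2 "B-" || p.2 == "O" then
      (pvFlushA merged ct cl, [p.1],
        if PySem.Str.startswith p.2 "B-" then some (PySem.Str.replace p.2 "B-" "") else none)
    else if PySem.Str.startswith p.2 "I-" && pvTruthy cl then
      (merged, ct ++ [p.1], cl)
    else (merged, ct, cl)

def align_bert_entities (aligned_labels : List (String × String)) : List (String × List String) :=
  let st := aligned_labels.foldl pvStepA (PySem.Dict.empty, [], none)
  (pvFlushA st.1 st.2.1 st.2.2).items

-- ===== PORT B =====
-- a boundary pair: a non-subtoken token whose label is "B-…" or "O"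
def pvIsCut (p : String × String) : Bool :=
  !(PySem.Str.startswith p.1 "##") && (PySem.Str.startswith p.2 "B-" || p.2 == "O")

-- pass 1, one iteration: open a new chunk at a boundary pair, else append to the last chunk (if any)
def pvAddPair (cs : List (List (String × String))) (p : String × String) :
    List (List (String × String)) :=
  if pvIsCut p then cs ++ [[p]]
  else match cs.getLast? with
    | some c => cs.dropLast ++ [c ++ [p]]
    | none => cs

-- pass 2, per chunk: its (entity text, entity label), or none when the chunk is discarded
def pvChunkSeg (chunk : List (String × String)) : Option (String × String) :=
  match chunk with
  | [] => none
  | (tok, lab) :: rest =>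
    if !(PySem.Str.startswith lab "B-") then none
    else
      let ent := PySem.Str.replace lab "B-" ""
      if ent == "" then none
      else
        let words := rest.foldl (fun ws q =>
          if PySem.Str.startswith q.1 "##" then
            match ws.getLast? with
            | some w => ws.dropLast ++ [w ++ PySem.Str.slice q.1 (some 2) none]
            | none => ws
          else if PySem.Str.startswith q.2 "I-" then ws ++ [q.1]
          else ws) [tok]
        some (PySem.Str.join " " words, ent)

def align_bert_entities_alt (aligned_labels : List (String × String)) : List (String × List String) :=
  let chunks := aligned_labels.foldl pvAddPair []
  (chunks.foldl (fun d c =>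
      match pvChunkSeg c with
      | some te => d.modify te.2 [] (fun v => v ++ [te.1])
      | none => d) PySem.Dict.empty).items

-- ===== PRECONDITION & SPEC =====
-- Pre_ excludes exactly the inputs where A raises IndexError: a "##" subtoken occurring
-- before any boundary pair (empty token buffer).
def Pre_align_bert_entities (aligned_labels : List (String × String)) : Prop :=
  ∀ i (h : i < aligned_labels.length), PySem.Str.startswith (aligned_labels[i]).1 "##" = true →
    ∃ p ∈ aligned_labels.take i, pvIsCut p = true
instance (aligned_labels : List (String × String)) : Decidable (Pre_align_bert_entities aligned_labels) := by
  unfold Pre_align_bert_entities; infer_instance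

def pvWitness_align_bert_entities : (List (String × String)) :=
  [("He", "O"), ("Rob", "B-PER"), ("##son", "I-PER"), ("cri", "B-LOC")]

def Spec_align_bert_entities (aligned_labels : List (String × String)) (out : List (String × List String)) : Prop := out = align_bert_entities_alt aligned_labels
instance (aligned_labels : List (String × String)) (out : List (String × List String)) : Decidable (Spec_align_bert_entities aligned_labels out) := by unfold Spec_align_bert_entities; infer_instance

-- ===== CLAIM (what is proved, stated in full; the proofs are below) =====
def Claim_equal_align_bert_entities : Prop := ∀ (aligned_labels : List (String × String)), Dom_align_bert_entities aligned_labels → Pre_align_bert_entities aligned_labels → Spec_align_bert_entities aligned_labels (align_bert_entities aligned_labels)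


-- ===== LEMMAS AND PROOFS =====

-- the stripped label A stores at a boundary pair with label `lab`
def pvCL (lab : String) : Option String :=
  if PySem.Str.startswith lab "B-" then some (PySem.Str.replace lab "B-" "") else none

-- A's token buffer after a chunk opened by token `tok` under stored label `cl`, fed `rest`
def pvBufA (cl : Option String) (tok : String) (rest : List (String × String)) : List String :=
  rest.foldl (fun ws q =>
    if PySem.Str.startswith q.1 "##" then
      match ws.getLast? with
      | some w => ws.dropLast ++ [w ++ PySem.Str.slice q.1 (some 2) none]
      | none => ws
    else if PySem.Str.startswith q.2 "I-" && pvTruthy cl then ws ++ [q.1]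
    else ws) [tok]

-- B's pass-2 grouping fold
def pvSegStep (d : PySem.Dict String (List String)) (c : List (String × String)) :
    PySem.Dict String (List String) :=
  match pvChunkSeg c with
  | some te => d.modify te.2 [] (fun v => v ++ [te.1])
  | none => d

def pvGroup2 (cs : List (List (String × String)))  : PySem.Dict String (List String) :=
  cs.foldl pvSegStep PySem.Dict.empty

theorem pvFlushA_eq_modify (d : PySem.Dict String (List String)) (l s : String) :
    (if d.contains l then d.modify l [] (fun v => v ++ [s]) else d.insert l [s])
      = d.modify l [] (fun v => v ++ [s]) := by
  by_cases h : d.contains l = true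
  · simp [h]
  · have h' : d.contains l = false := by revert h; cases d.contains l <;> simp
    simp only [h', Bool.false_eq_true, if_false, PySem.Dict.modify,
      PySem.Dict.getD_of_not_contains d [] h', List.nil_append]

theorem pvBufA_ne_nil (cl : Option String) (tok : String) (rest : List (String × String)) :
    pvBufA cl tok rest ≠ [] := by
  unfold pvBufA
  suffices h : ∀ (ws : List String), ws ≠ [] → rest.foldl _ ws ≠ [] from h [tok] (by simp)
  induction rest with
  | nil => intro ws h; simpa using h
  | cons q r ih =>
    intro ws hws
    simp only [List.foldl_cons]
    apply ih
    split_ifs with h1 h2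
    · obtain ⟨w, hw⟩ := Option.isSome_iff_exists.mp (List.getLast?_isSome.mpr hws)
      simp [hw]
    · simp
    · exact hws

theorem pvBufA_snoc (cl : Option String) (tok : String) (rest : List (String × String))
    (p : String × String) :
    pvBufA cl tok (rest ++ [p]) =
      (if PySem.Str.startswith p.1 "##" then
        match (pvBufA cl tok rest).getLast? with
        | some w => (pvBufA cl tok rest).dropLast ++ [w ++ PySem.Str.slice p.1 (some 2) none]
        | none => pvBufA cl tok rest
      else if PySem.Str.startswith p.2 "I-" && pvTruthy cl then pvBufA cl tok rest ++ [p.1]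
      else pvBufA cl tok rest) := by
  unfold pvBufA
  rw [List.foldl_append]
  simp

-- when the stored label is truthy, A's buffer coincides with pvChunkSeg's word fold
theorem pvBufA_eq_words (cl : Option String) (tok : String) (rest : List (String × String))
    (h : pvTruthy cl = true) :
    pvBufA cl tok rest =
      rest.foldl (fun ws q =>
        if PySem.Str.startswith q.1 "##" then
          match ws.getLast? with
          | some w => ws.dropLast ++ [w ++ PySem.Str.slice q.1 (some 2) none]
          | none => ws
        else if PySem.Str.startswith q.2 "I-" then ws ++ [q.1]
        else ws) [tok] := by
  unfold pvBufA
  congr 1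
  funext ws q
  rw [h]
  simp only [Bool.and_true]

theorem pvBoolFalse {b : Bool} (h : ¬ b = true) : b = false := by
  cases b
  · rfl
  · exact absurd rfl h

-- flushing A's end-of-chunk state is exactly B's pass-2 step on the chunk
theorem pvFlush_chunk (d : PySem.Dict String (List String)) (tok lab : String)
    (rest : List (String × String)) :
    pvFlushA d (pvBufA (pvCL lab) tok rest) (pvCL lab) = pvSegStep d ((tok, lab) :: rest) := by
  by_cases hb : PySem.Str.startswith lab "B-" = true
  · by_cases he : PySem.Str.replace lab "B-" "" = ""
    · have hcl : pvCL lab = some "" := by unfold pvCL; rw [if_pos hb, he]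
      have htr : pvTruthy (some "") = false := rfl
      rw [hcl]
      simp only [pvFlushA, pvSegStep, pvChunkSeg, htr, hb, Bool.and_false, Bool.false_eq_true,
        if_false, Bool.not_true, beq_iff_eq, he, if_pos trivial]
    · have hcl : pvCL lab = some (PySem.Str.replace lab "B-" "") := by
        unfold pvCL; rw [if_pos hb]
      have htr : pvTruthy (pvCL lab) = true := by
        rw [hcl]
        unfold pvTruthy
        simp only [Bool.not_eq_eq_eq_not]
        simpa using he
      have hne := pvBufA_ne_nil (pvCL lab) tok rest
      rw [pvBufA_eq_words _ _ _ htr] at hne ⊢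
      have hcond : (!(rest.foldl (fun ws q =>
          if PySem.Str.startswith q.1 "##" then
            match ws.getLast? with
            | some w => ws.dropLast ++ [w ++ PySem.Str.slice q.1 (some 2) none]
            | none => ws
          else if PySem.Str.startswith q.2 "I-" then ws ++ [q.1]
          else ws) [tok]).isEmpty && pvTruthy (pvCL lab)) = true := by
        rw [htr, List.isEmpty_eq_false_iff.mpr hne]
        rfl
      unfold pvFlushA
      rw [if_pos hcond, pvFlushA_eq_modify]
      simp only [pvSegStep, pvChunkSeg, hb, Bool.not_true, Bool.false_eq_true, if_false,
        if_neg (by simpa using he : ¬ ((PySem.Str.replace lab "B-" "" == "") = true)), hcl,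
        Option.getD_some]
  · have hb' : PySem.Str.startswith lab "B-" = false := pvBoolFalse hb
    have hcl : pvCL lab = none := by unfold pvCL; rw [hb']; rfl
    rw [hcl]
    simp only [pvFlushA, pvSegStep, pvChunkSeg, hb', pvTruthy, Bool.and_false,
      Bool.false_eq_true, if_false, Bool.not_false, if_true]

-- the simulation relation between A's loop state and B's pass-1 chunk list
def pvRel (a : PySem.Dict String (List String) × List String × Option String)
    (cs : List (List (String × String))) : Prop :=
  match cs.getLast? with
  | none => a.1 = PySem.Dict.empty ∧ a.2.1 = [] ∧ a.2.2 = none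
  | some c => ∃ tok lab rest, c = (tok, lab) :: rest ∧ a.2.2 = pvCL lab ∧
      a.2.1 = pvBufA (pvCL lab) tok rest ∧ a.1 = pvGroup2 cs.dropLast

theorem pvGroup2_snoc (cs : List (List (String × String))) (c : List (String × String)) :
    pvGroup2 (cs ++ [c]) = pvSegStep (pvGroup2 cs) c := by
  unfold pvGroup2; rw [List.foldl_append]; simp

theorem pvStep_rel (a : PySem.Dict String (List String) × List String × Option String)
    (cs : List (List (String × String))) (p : String × String) (h : pvRel a cs) :
    pvRel (pvStepA a p) (pvAddPair cs p) := by
  obtain ⟨d, ct, cl⟩ := a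
  by_cases hcut : pvIsCut p = true
  · -- boundary pair: A flushes and restarts, B opens a new chunk
    have hcut2 := hcut
    simp only [pvIsCut, Bool.and_eq_true, Bool.not_eq_true'] at hcut2
    obtain ⟨hsub, hbo⟩ := hcut2
    have hstep : pvStepA (d, ct, cl) p = (pvFlushA d ct cl, [p.1], pvCL p.2) := by
      unfold pvStepA pvCL
      rw [hsub, hbo]
      simp only [Bool.false_eq_true, if_false, if_true]
    rw [hstep]
    unfold pvAddPair
    rw [if_pos hcut]
    unfold pvRel
    simp only [List.getLast?_append, List.getLast?_singleton, List.dropLast_concat]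
    refine ⟨p.1, p.2, [], rfl, rfl, by unfold pvBufA; rfl, ?_⟩
    unfold pvRel at h
    cases hlast : cs.getLast? with
    | none =>
      have hnil : cs = [] := List.getLast?_eq_none_iff.mp hlast
      rw [hlast] at h
      obtain ⟨h1, h2, h3⟩ := h
      simp only at h1 h2 h3
      subst hnil h1 h2 h3
      simp [pvFlushA, pvTruthy, pvGroup2]
    | some c =>
      rw [hlast] at h
      obtain ⟨tok, lab, rest, hc, h2, h3, h4⟩ := h
      obtain ⟨cs', rfl⟩ := List.getLast?_eq_some_iff.mp hlast
      simp only at h2 h3 h4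
      subst hc h2 h3 h4
      simp only [List.dropLast_concat]
      rw [pvGroup2_snoc, ← pvFlush_chunk]
  · -- non-boundary pair
    have hcut' : pvIsCut p = false := pvBoolFalse hcut
    unfold pvAddPair
    rw [hcut']
    simp only [Bool.false_eq_true, if_false]
    unfold pvRel at h
    cases hlast : cs.getLast? with
    | none =>
      -- before the first boundary: A's port leaves the empty state unchanged
      have hnil : cs = [] := List.getLast?_eq_none_iff.mp hlast
      rw [hlast] at h
      obtain ⟨h1, h2, h3⟩ := h
      simp only at h1 h2 h3
      subst hnil h1 h2 h3
      have hfix : pvStepA (PySem.Dict.empty, [], none) p = (PySem.Dict.empty, [], none) := by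
        unfold pvStepA
        by_cases hsub : PySem.Str.startswith p.1 "##" = true
        · rw [hsub]
          simp
        · have hsub' : PySem.Str.startswith p.1 "##" = false := pvBoolFalse hsub
          have hbo : (PySem.Str.startswith p.2 "B-" || p.2 == "O") = false := by
            unfold pvIsCut at hcut'
            rw [hsub'] at hcut'
            simpa using hcut'
          rw [hsub', hbo]
          simp [pvTruthy]
      rw [hfix]
      unfold pvRel
      simp
    | some c =>
      rw [hlast] at h
      obtain ⟨tok, lab, rest, hc, h2, h3, h4⟩ := h
      obtain ⟨cs', rfl⟩ := List.getLast?_eq_some_iff.mp hlast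
      simp only at h2 h3 h4
      subst hc h2 h3 h4
      simp only [List.dropLast_concat]
      by_cases hsub : PySem.Str.startswith p.1 "##" = true
      · obtain ⟨w, hw⟩ := Option.isSome_iff_exists.mp
          (List.getLast?_isSome.mpr (pvBufA_ne_nil (pvCL lab) tok rest))
        have hstep : pvStepA (pvGroup2 cs', pvBufA (pvCL lab) tok rest, pvCL lab) p =
            (pvGroup2 cs', (pvBufA (pvCL lab) tok rest).dropLast ++
              [w ++ PySem.Str.slice p.1 (some 2) none], pvCL lab) := by
          simp only [pvStepA]
          rw [hsub, hw]
          simp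
        rw [hstep]
        unfold pvRel
        simp only [List.getLast?_append, List.getLast?_singleton, List.dropLast_concat]
        refine ⟨tok, lab, rest ++ [p], rfl, rfl, ?_, by first | rfl | trivial⟩
        rw [pvBufA_snoc, if_pos hsub, hw]
      · have hsub' : PySem.Str.startswith p.1 "##" = false := pvBoolFalse hsub
        have hbo : (PySem.Str.startswith p.2 "B-" || p.2 == "O") = false := by
          unfold pvIsCut at hcut'
          rw [hsub'] at hcut'
          simpa using hcut'
        by_cases hi : (PySem.Str.startswith p.2 "I-" && pvTruthy (pvCL lab)) = true
        · have hstep : pvStepA (pvGroup2 cs', pvBufA (pvCL lab) tok rest, pvCL lab) p =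
              (pvGroup2 cs', pvBufA (pvCL lab) tok rest ++ [p.1], pvCL lab) := by
            simp only [pvStepA]
            rw [hsub', hbo, hi]
            simp
          rw [hstep]
          unfold pvRel
          simp only [List.getLast?_append, List.getLast?_singleton, List.dropLast_concat]
          refine ⟨tok, lab, rest ++ [p], rfl, rfl, ?_, by first | rfl | trivial⟩
          rw [pvBufA_snoc, hsub', hi]
          simp only [Bool.false_eq_true, if_false, if_true]
        · have hi' : (PySem.Str.startswith p.2 "I-" && pvTruthy (pvCL lab)) = false :=
            pvBoolFalse hi
          have hstep : pvStepA (pvGroup2 cs', pvBufA (pvCL lab) tok rest, pvCL lab) p =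
              (pvGroup2 cs', pvBufA (pvCL lab) tok rest, pvCL lab) := by
            simp only [pvStepA]
            rw [hsub', hbo, hi']
            simp
          rw [hstep]
          unfold pvRel
          simp only [List.getLast?_append, List.getLast?_singleton, List.dropLast_concat]
          refine ⟨tok, lab, rest ++ [p], rfl, rfl, ?_, by first | rfl | trivial⟩
          rw [pvBufA_snoc, hsub', hi']
          simp only [Bool.false_eq_true, if_false]

theorem pvFold_rel (xs : List (String × String))
    (a : PySem.Dict String (List String) × List String × Option String)
    (cs : List (List (String × String))) (h : pvRel a cs) :
    pvRel (xs.foldl pvStepA a) (xs.foldl pvAddPair cs) := by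
  induction xs generalizing a cs with
  | nil => exact h
  | cons q rest ih => exact ih _ _ (pvStep_rel a cs q h)

-- ===== VERDICT (by name: the statement is the Claim_ definition above) =====
theorem align_bert_entities_spec : Claim_equal_align_bert_entities := by
  intro xs _ _
  unfold Spec_align_bert_entities align_bert_entities align_bert_entities_alt
  have h := pvFold_rel xs (PySem.Dict.empty, [], none) [] (by unfold pvRel; simp)
  set sa := xs.foldl pvStepA (PySem.Dict.empty, [], none) with hsa
  set cs := xs.foldl pvAddPair [] with hcs
  unfold pvRel at h
  cases hlast : cs.getLast? with
  | none =>
    have hnil : cs = [] := List.getLast?_eq_none_iff.mp hlast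
    rw [hlast] at h
    obtain ⟨h1, h2, h3⟩ := h
    simp only
    rw [h1, h2, h3, hnil]
    simp [pvFlushA, pvTruthy]
  | some c =>
    rw [hlast] at h
    obtain ⟨tok, lab, rest, hc, h2, h3, h4⟩ := h
    obtain ⟨cs', hcs'⟩ := List.getLast?_eq_some_iff.mp hlast
    simp only
    rw [h2, h3, h4, pvFlush_chunk, ← hc, hcs', List.dropLast_concat]
    show (pvSegStep (pvGroup2 cs') c).items = (pvGroup2 (cs' ++ [c])).items
    rw [pvGroup2_snoc]
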